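-- pv_equiv track=rewrite | github.com/tsmalls33/reservation-tracking-sheets | main.py | translate_tab_names
-- ===== SOURCE A (Python) =====
-- MONTH_NAMES = {
--     'january': {'en': 'January', 'es': 'Enero'},
--     'february': {'en': 'February', 'es': 'Febrero'},
--     'march': {'en': 'March', 'es': 'Marzo'},
--     'april': {'en': 'April', 'es': 'Abril'},
--     'may': {'en': 'May', 'es': 'Mayo'},
--     'june': {'en': 'June', 'es': 'Junio'},
--     'july': {'en': 'July', 'es': 'Julio'},
--     'august': {'en': 'August', 'es': 'Agosto'},
--     'september': {'en': 'September', 'es': 'Septiembre'},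
--     'october': {'en': 'October', 'es': 'Octubre'},
--     'november': {'en': 'November', 'es': 'Noviembre'},
--     'december': {'en': 'December', 'es': 'Diciembre'}
-- }
--
-- def translate_tab_names(config_data, target_language):
--     """Translate all tab_name values in config to target language.
--
--     Args:
--         config_data: Config dictionary
--         target_language: 'en' or 'es'
--
--     Returns:
--         Updated config_data with translated tab names
--     """
--     if 'tabs' not in config_data:
--         return config_data
--
--     # Build reverse lookup: month name -> month key
--     month_lookup = {}
--     for month_key, translations in MONTH_NAMES.items():
--         month_lookup[translations['en'].lower()] = month_key
--         month_lookup[translations['es'].lower()] = month_key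
--
--     # Update each tab's tab_name
--     for tab_key, tab_config in config_data['tabs'].items():
--         if 'tab_name' not in tab_config:
--             continue
--
--         current_tab_name = tab_config['tab_name'].strip()
--
--         # Find the month key from current tab name
--         month_key = month_lookup.get(current_tab_name.lower())
--
--         if month_key:
--             # Translate to target language
--             new_tab_name = MONTH_NAMES[month_key][target_language]
--             tab_config['tab_name'] = new_tab_name
--
--     return config_data
-- ===== SOURCE B (Python) =====
-- MONTH_NAMES = {
--     'january': {'en': 'January', 'es': 'Enero'},
--     'february': {'en': 'February', 'es': 'Febrero'},
--     'march': {'en': 'March', 'es': 'Marzo'},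
--     'april': {'en': 'April', 'es': 'Abril'},
--     'may': {'en': 'May', 'es': 'Mayo'},
--     'june': {'en': 'June', 'es': 'Junio'},
--     'july': {'en': 'July', 'es': 'Julio'},
--     'august': {'en': 'August', 'es': 'Agosto'},
--     'september': {'en': 'September', 'es': 'Septiembre'},
--     'october': {'en': 'October', 'es': 'Octubre'},
--     'november': {'en': 'November', 'es': 'Noviembre'},
--     'december': {'en': 'December', 'es': 'Diciembre'}
-- }
--
-- def translate_tab_names(config_data, target_language):
--     """Translate all tab_name values in config to target language.
--
--     Month-major traversal: for each of the 12 months in turn, one pass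
--     over the tabs rewrites every tab whose (stripped, lowered) name is
--     one of that month's two spellings.  Correct because the 24 lowered
--     month names are pairwise distinct, so each tab matches at most one
--     month; no reverse-lookup dict and no per-tab search is needed.
--     """
--     if 'tabs' not in config_data:
--         return config_data
--
--     tabs = config_data['tabs']
--     for tr in MONTH_NAMES.values():
--         names = {tr['en'].lower(), tr['es'].lower()}
--         for tab_config in tabs.values():
--             if 'tab_name' in tab_config and \
--                     tab_config['tab_name'].strip().lower() in names:
--                 tab_config['tab_name'] = tr[target_language]
--     return config_data
-- ===== Notes on version B (the rewrite author's own statement) =====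
-- stated objective: alternative
-- what changed: B transposes the loop structure: instead of A's build-a-reverse-lookup-dict-then-one-pass-over-tabs, B makes one rewriting pass over the tabs per month (month-major traversal), correct because the 24 lowered month names are pairwise distinct so each tab matches at most one month.
import Mathlib
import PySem

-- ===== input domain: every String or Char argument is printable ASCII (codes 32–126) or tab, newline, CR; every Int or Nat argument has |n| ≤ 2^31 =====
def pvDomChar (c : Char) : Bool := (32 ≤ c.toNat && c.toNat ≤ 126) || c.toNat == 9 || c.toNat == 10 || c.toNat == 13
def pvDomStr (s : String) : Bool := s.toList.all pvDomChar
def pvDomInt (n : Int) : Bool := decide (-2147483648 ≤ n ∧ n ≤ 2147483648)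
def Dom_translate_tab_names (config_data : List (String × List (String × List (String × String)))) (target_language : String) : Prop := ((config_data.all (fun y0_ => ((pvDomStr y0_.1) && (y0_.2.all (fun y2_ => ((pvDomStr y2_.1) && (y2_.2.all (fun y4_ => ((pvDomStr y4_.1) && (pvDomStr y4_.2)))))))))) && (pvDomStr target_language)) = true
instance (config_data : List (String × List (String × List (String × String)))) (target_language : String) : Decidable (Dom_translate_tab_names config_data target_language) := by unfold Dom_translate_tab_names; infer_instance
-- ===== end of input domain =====

-- B transposes A's traversal: instead of building a reverse-lookup dict and doing one pass over the tabs,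
-- B does one rewriting pass over the tabs per month (month-major); correct since the 24 lowered month names are distinct.
-- Python A mutates config_data in place and returns it; B performs the same mutation; the theorems are about the return value.


-- ===== PORT A =====
-- the module constant MONTH_NAMES (dict of dicts, insertion order)
def pvMonthNames : PySem.Dict String (PySem.Dict String String) :=
  PySem.Dict.mk
    [ ("january",   PySem.Dict.mk [("en", "January"),   ("es", "Enero")]),
      ("february",  PySem.Dict.mk [("en", "February"),  ("es", "Febrero")]),
      ("march",     PySem.Dict.mk [("en", "March"),     ("es", "Marzo")]),
      ("april",     PySem.Dict.mk [("en", "April"),     ("es", "Abril")]),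
      ("may",       PySem.Dict.mk [("en", "May"),       ("es", "Mayo")]),
      ("june",      PySem.Dict.mk [("en", "June"),      ("es", "Junio")]),
      ("july",      PySem.Dict.mk [("en", "July"),      ("es", "Julio")]),
      ("august",    PySem.Dict.mk [("en", "August"),    ("es", "Agosto")]),
      ("september", PySem.Dict.mk [("en", "September"), ("es", "Septiembre")]),
      ("october",   PySem.Dict.mk [("en", "October"),   ("es", "Octubre")]),
      ("november",  PySem.Dict.mk [("en", "November"),  ("es", "Noviembre")]),
      ("december",  PySem.Dict.mk [("en", "December"),  ("es", "Diciembre")]) ]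

-- A's reverse lookup: for month_key, translations in MONTH_NAMES.items(): insert en.lower() and es.lower()
def pvMonthLookup : PySem.Dict String String :=
  pvMonthNames.items.foldl
    (fun d p =>
      (d.insert (PySem.Str.lower (p.2.getD "en" "")) p.1).insert
        (PySem.Str.lower (p.2.getD "es" "")) p.1)
    PySem.Dict.empty

-- A's loop body on one tab_config (inner dict lookups on the constant table use getD: the keys are always present;
-- MONTH_NAMES[month_key][target_language] uses getD "" — Pre_ excludes the inputs where Python raises KeyError there)
def pvUpdA (target_language : String) (tab : List (String × String)) : List (String × String) :=
  if (PySem.Dict.mk tab).contains "tab_name" = false then tab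
  else
    let current := PySem.Str.strip ((PySem.Dict.mk tab).getD "tab_name" "")
    match pvMonthLookup.get? (PySem.Str.lower current) with
    | none => tab
    | some month_key =>
        if month_key == "" then tab   -- Python's truthiness test 'if month_key:'
        else
          ((PySem.Dict.mk tab).insert "tab_name"
            ((pvMonthNames.getD month_key PySem.Dict.empty).getD target_language "")).items

def translate_tab_names (config_data : List (String × List (String × List (String × String)))) (target_language : String) : List (String × List (String × List (String × String))) :=
  if (PySem.Dict.mk config_data).contains "tabs" = false then config_data
  else
    let tabs := (PySem.Dict.mk config_data).getD "tabs" []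
    let newTabs := tabs.map (fun p => (p.1, pvUpdA target_language p.2))
    ((PySem.Dict.mk config_data).insert "tabs" newTabs).items

-- ===== PORT B =====
-- names = {tr['en'].lower(), tr['es'].lower()}  (the two lowered spellings of one month)
def pvNamesOf (tr : PySem.Dict String String) : List String :=
  [PySem.Str.lower (tr.getD "en" ""), PySem.Str.lower (tr.getD "es" "")]

-- B's inner-loop body: rewrite one tab if its name is one of THIS month's spellings
-- (tr[target_language] ported as getD ""; Pre_ excludes the inputs where Python raises KeyError there)
def pvPassStep (target_language : String) (tr : PySem.Dict String String) (tab : List (String × String)) : List (String × String) :=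
  if (PySem.Dict.mk tab).contains "tab_name" = false then tab
  else if PySem.Str.lower (PySem.Str.strip ((PySem.Dict.mk tab).getD "tab_name" "")) ∈ pvNamesOf tr then
    ((PySem.Dict.mk tab).insert "tab_name" (tr.getD target_language "")).items
  else tab

-- month-major: for tr in MONTH_NAMES.values(): one pass over the tabs
def translate_tab_names_alt (config_data : List (String × List (String × List (String × String)))) (target_language : String) : List (String × List (String × List (String × String))) :=
  if (PySem.Dict.mk config_data).contains "tabs" = false then config_data
  else
    ((PySem.Dict.mk config_data).insert "tabs"
      (pvMonthNames.values.foldl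
        (fun tabs tr => tabs.map (fun p => (p.1, pvPassStep target_language tr p.2)))
        ((PySem.Dict.mk config_data).getD "tabs" []))).items

-- ===== PRECONDITION & SPEC =====
-- the 24 lowered month names of the table
def pvLoweredNames : List String :=
  ["january", "enero", "february", "febrero", "march", "marzo", "april", "abril",
   "may", "mayo", "june", "junio", "july", "julio", "august", "agosto",
   "september", "septiembre", "october", "octubre", "november", "noviembre",
   "december", "diciembre"]

-- Pre_ excludes exactly the inputs where Python (A and B alike) raises KeyError: a tab name matching a
-- month name while target_language is neither 'en' nor 'es'
def Pre_translate_tab_names (config_data : List (String × List (String × List (String × String)))) (target_language : String) : Prop :=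
  target_language = "en" ∨ target_language = "es" ∨
    (∀ e ∈ config_data, e.1 = "tabs" →
      ∀ t ∈ e.2, ∀ q ∈ t.2, q.1 = "tab_name" →
        PySem.Str.lower (PySem.Str.strip q.2) ∉ pvLoweredNames)
instance (config_data : List (String × List (String × List (String × String)))) (target_language : String) : Decidable (Pre_translate_tab_names config_data target_language) := by unfold Pre_translate_tab_names; infer_instance

def pvWitness_translate_tab_names : (List (String × List (String × List (String × String)))) × String :=
  ([("tabs", [("m1", [("tab_name", " Enero ")]), ("m2", [("color", "red")])]), ("title", [])], "en")

def Spec_translate_tab_names (config_data : List (String × List (String × List (String × String)))) (target_language : String) (out : List (String × List (String × List (String × String)))) : Prop := out = translate_tab_names_alt config_data target_language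
instance (config_data : List (String × List (String × List (String × String)))) (target_language : String) (out : List (String × List (String × List (String × String)))) : Decidable (Spec_translate_tab_names config_data target_language out) := by unfold Spec_translate_tab_names; infer_instance

-- ===== CLAIM (what is proved, stated in full; the proofs are below) =====
def Claim_equal_translate_tab_names : Prop := ∀ (config_data : List (String × List (String × List (String × String)))) (target_language : String), Dom_translate_tab_names config_data target_language → Pre_translate_tab_names config_data target_language → Spec_translate_tab_names config_data target_language (translate_tab_names config_data target_language)

-- ===== LEMMAS AND PROOFS =====
-- the stripped, lowered tab name a pass looks at
def pvStr (tab : List (String × String)) : String :=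
  PySem.Str.lower (PySem.Str.strip ((PySem.Dict.mk tab).getD "tab_name" ""))

-- B's fold of 12 maps over the tab list = one map applying the composed per-tab fold
lemma pv_foldl_map_comm (lang : String) (trs : List (PySem.Dict String String))
    (xs : List (String × List (String × String))) :
    trs.foldl (fun tabs tr => tabs.map (fun p => (p.1, pvPassStep lang tr p.2))) xs
      = xs.map (fun p => (p.1, trs.foldl (fun a tr => pvPassStep lang tr a) p.2)) := by
  induction trs generalizing xs with
  | nil => simp
  | cons u us ih =>
      simp only [List.foldl_cons, ih, List.map_map]
      rfl

-- a tab without 'tab_name': every pass is the identity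
lemma pv_skip_nc (lang : String) (tab : List (String × String))
    (trs : List (PySem.Dict String String))
    (hc : (PySem.Dict.mk tab).contains "tab_name" = false) :
    trs.foldl (fun a tr => pvPassStep lang tr a) tab = tab := by
  induction trs with
  | nil => rfl
  | cons u us ih =>
      rw [List.foldl_cons, show pvPassStep lang u tab = tab by unfold pvPassStep; rw [if_pos hc], ih]

-- the original tab is untouched by months none of whose spellings it matches
lemma pv_skip_orig (lang : String) (tab : List (String × String))
    (trs : List (PySem.Dict String String))
    (h : ∀ u ∈ trs, pvStr tab ∉ pvNamesOf u) :
    trs.foldl (fun a tr => pvPassStep lang tr a) tab = tab := by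
  induction trs with
  | nil => rfl
  | cons u us ih =>
      have hstep : pvPassStep lang u tab = tab := by
        unfold pvPassStep
        split_ifs with h1 h2
        · rfl
        · exact absurd h2 (h u (List.mem_cons_self))
        · rfl
      rw [List.foldl_cons, hstep, ih (fun x hx => h x (List.mem_cons_of_mem _ hx))]

-- a pass applied to an already-rewritten tab
lemma pv_pass_T (lang : String) (tr : PySem.Dict String String) (x : String)
    (tab : List (String × String)) :
    pvPassStep lang tr (((PySem.Dict.mk tab).insert "tab_name" x).items)
      = if PySem.Str.lower (PySem.Str.strip x) ∈ pvNamesOf tr then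
          ((PySem.Dict.mk tab).insert "tab_name" (tr.getD lang "")).items
        else ((PySem.Dict.mk tab).insert "tab_name" x).items := by
  have hmk : PySem.Dict.mk (((PySem.Dict.mk tab).insert "tab_name" x).items)
      = (PySem.Dict.mk tab).insert "tab_name" x := PySem.Dict.ext_iff.mpr rfl
  unfold pvPassStep
  rw [hmk, PySem.Dict.contains_insert_self, PySem.Dict.getD_insert_self,
      PySem.Dict.insert_insert_self]
  simp

-- an already-rewritten tab is untouched by months none of whose spellings its new name matches
lemma pv_skip_T (lang : String) (x : String) (tab : List (String × String))
    (trs : List (PySem.Dict String String))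
    (h : ∀ u ∈ trs, PySem.Str.lower (PySem.Str.strip x) ∉ pvNamesOf u) :
    trs.foldl (fun a tr => pvPassStep lang tr a)
        (((PySem.Dict.mk tab).insert "tab_name" x).items)
      = ((PySem.Dict.mk tab).insert "tab_name" x).items := by
  induction trs with
  | nil => rfl
  | cons u us ih =>
      rw [List.foldl_cons, pv_pass_T, if_neg (h u (List.mem_cons_self)),
          ih (fun y hy => h y (List.mem_cons_of_mem _ hy))]

-- MONTH_NAMES[month_key][lang] with a two-key dict: the value is the en-value, the es-value or the default
lemma pv_getD_lang3 (E S lang : String) :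
    (PySem.Dict.mk [("en", E), ("es", S)]).getD lang "" = E ∨
    (PySem.Dict.mk [("en", E), ("es", S)]).getD lang "" = S ∨
    (PySem.Dict.mk [("en", E), ("es", S)]).getD lang "" = "" := by
  by_cases h1 : lang = "en"
  · subst h1; left; rfl
  · by_cases h2 : lang = "es"
    · subst h2; right; left; rfl
    · right; right
      have b1 : ("en" == lang) = false := beq_eq_false_iff_ne.mpr (Ne.symm h1)
      have b2 : ("es" == lang) = false := beq_eq_false_iff_ne.mpr (Ne.symm h2)
      have hnil : (PySem.Dict.mk ([] : List (String × String))).get? lang = none := rfl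
      simp [PySem.Dict.getD_eq_get?_getD, PySem.Dict.get?_mk_cons, b1, b2, hnil]

-- the composed per-tab fold when month tr = {en: E, es: S} is the (unique) month the tab matches
lemma pv_fire (lang : String) (tab : List (String × String))
    (pre suf : List (PySem.Dict String String)) (E S : String)
    (hsplit : pvMonthNames.values = pre ++ (PySem.Dict.mk [("en", E), ("es", S)]) :: suf)
    (hc : (PySem.Dict.mk tab).contains "tab_name" = true)
    (hpre : ∀ u ∈ pre, pvStr tab ∉ pvNamesOf u)
    (hfire : pvStr tab ∈ pvNamesOf (PySem.Dict.mk [("en", E), ("es", S)]))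
    (hsuf : ∀ c ∈ [E, S, ""], ∀ u ∈ suf, PySem.Str.lower (PySem.Str.strip c) ∉ pvNamesOf u) :
    pvMonthNames.values.foldl (fun a tr => pvPassStep lang tr a) tab
      = ((PySem.Dict.mk tab).insert "tab_name"
          ((PySem.Dict.mk [("en", E), ("es", S)]).getD lang "")).items := by
  rw [hsplit, List.foldl_append, pv_skip_orig lang tab pre hpre, List.foldl_cons]
  have hstep : pvPassStep lang (PySem.Dict.mk [("en", E), ("es", S)]) tab
      = ((PySem.Dict.mk tab).insert "tab_name"
          ((PySem.Dict.mk [("en", E), ("es", S)]).getD lang "")).items := by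
    unfold pvPassStep pvStr at *
    rw [if_neg (by simp [hc]), if_pos hfire]
  rw [hstep]
  apply pv_skip_T
  intro u hu
  rcases pv_getD_lang3 E S lang with h | h | h <;> rw [h]
  · exact hsuf E (by simp) u hu
  · exact hsuf S (by simp) u hu
  · exact hsuf "" (by simp) u hu

-- A's branch when the lookup hits
lemma pv_updA_fire (lang : String) (tab : List (String × String)) (key : String)
    (tr : PySem.Dict String String)
    (hc : (PySem.Dict.mk tab).contains "tab_name" = true)
    (hlook : pvMonthLookup.get? (pvStr tab) = some key)
    (hkey : (key == "") = false)
    (htr : pvMonthNames.getD key PySem.Dict.empty = tr) :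
    pvUpdA lang tab = ((PySem.Dict.mk tab).insert "tab_name" (tr.getD lang "")).items := by
  unfold pvUpdA
  unfold pvStr at hlook
  rw [if_neg (by simp [hc])]
  simp only [hlook, hkey, Bool.false_eq_true, if_false, htr]

-- the per-tab composed fold of B equals A's per-tab update
set_option maxHeartbeats 2000000 in
lemma pv_perTab (lang : String) (tab : List (String × String)) :
    pvMonthNames.values.foldl (fun a tr => pvPassStep lang tr a) tab = pvUpdA lang tab := by
  by_cases hc : (PySem.Dict.mk tab).contains "tab_name" = false
  · rw [pv_skip_nc lang tab _ hc]
    unfold pvUpdA; rw [if_pos hc]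
  · have hc' : (PySem.Dict.mk tab).contains "tab_name" = true := by
      revert hc; cases (PySem.Dict.mk tab).contains "tab_name" <;> simp
    by_cases hs : pvStr tab ∈ pvLoweredNames
    · -- 24 concrete cases, one per lowered month name
      simp only [pvLoweredNames, List.mem_cons, List.not_mem_nil, or_false] at hs
      rcases hs with hs | hs | hs | hs | hs | hs | hs | hs | hs | hs | hs | hs |
        hs | hs | hs | hs | hs | hs | hs | hs | hs | hs | hs | hs
      · rw [pv_fire lang tab [] [PySem.Dict.mk [("en", "February"), ("es", "Febrero")], PySem.Dict.mk [("en", "March"), ("es", "Marzo")], PySem.Dict.mk [("en", "April"), ("es", "Abril")], PySem.Dict.mk [("en", "May"), ("es", "Mayo")], PySem.Dict.mk [("en", "June"), ("es", "Junio")], PySem.Dict.mk [("en", "July"), ("es", "Julio")], PySem.Dict.mk [("en", "August"), ("es", "Agosto")], PySem.Dict.mk [("en", "September"), ("es", "Septiembre")], PySem.Dict.mk [("en", "October"), ("es", "Octubre")], PySem.Dict.mk [("en", "November"), ("es", "Noviembre")], PySem.Dict.mk [("en", "December"), ("es", "Diciembre")]] "January" "Enero" rfl hc'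
              (by intro u hu; rw [hs]; fin_cases hu <;> decide)
              (by rw [hs]; decide) (by decide)]
        exact (pv_updA_fire lang tab "january" (PySem.Dict.mk [("en", "January"), ("es", "Enero")]) hc'
              (by rw [hs]; decide) (by decide) (by decide)).symm
      · rw [pv_fire lang tab [] [PySem.Dict.mk [("en", "February"), ("es", "Febrero")], PySem.Dict.mk [("en", "March"), ("es", "Marzo")], PySem.Dict.mk [("en", "April"), ("es", "Abril")], PySem.Dict.mk [("en", "May"), ("es", "Mayo")], PySem.Dict.mk [("en", "June"), ("es", "Junio")], PySem.Dict.mk [("en", "July"), ("es", "Julio")], PySem.Dict.mk [("en", "August"), ("es", "Agosto")], PySem.Dict.mk [("en", "September"), ("es", "Septiembre")], PySem.Dict.mk [("en", "October"), ("es", "Octubre")], PySem.Dict.mk [("en", "November"), ("es", "Noviembre")], PySem.Dict.mk [("en", "December"), ("es", "Diciembre")]] "January" "Enero" rfl hc'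
              (by intro u hu; rw [hs]; fin_cases hu <;> decide)
              (by rw [hs]; decide) (by decide)]
        exact (pv_updA_fire lang tab "january" (PySem.Dict.mk [("en", "January"), ("es", "Enero")]) hc'
              (by rw [hs]; decide) (by decide) (by decide)).symm
      · rw [pv_fire lang tab [PySem.Dict.mk [("en", "January"), ("es", "Enero")]] [PySem.Dict.mk [("en", "March"), ("es", "Marzo")], PySem.Dict.mk [("en", "April"), ("es", "Abril")], PySem.Dict.mk [("en", "May"), ("es", "Mayo")], PySem.Dict.mk [("en", "June"), ("es", "Junio")], PySem.Dict.mk [("en", "July"), ("es", "Julio")], PySem.Dict.mk [("en", "August"), ("es", "Agosto")], PySem.Dict.mk [("en", "September"), ("es", "Septiembre")], PySem.Dict.mk [("en", "October"), ("es", "Octubre")], PySem.Dict.mk [("en", "November"), ("es", "Noviembre")], PySem.Dict.mk [("en", "December"), ("es", "Diciembre")]] "February" "Febrero" rfl hc'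
              (by intro u hu; rw [hs]; fin_cases hu <;> decide)
              (by rw [hs]; decide) (by decide)]
        exact (pv_updA_fire lang tab "february" (PySem.Dict.mk [("en", "February"), ("es", "Febrero")]) hc'
              (by rw [hs]; decide) (by decide) (by decide)).symm
      · rw [pv_fire lang tab [PySem.Dict.mk [("en", "January"), ("es", "Enero")]] [PySem.Dict.mk [("en", "March"), ("es", "Marzo")], PySem.Dict.mk [("en", "April"), ("es", "Abril")], PySem.Dict.mk [("en", "May"), ("es", "Mayo")], PySem.Dict.mk [("en", "June"), ("es", "Junio")], PySem.Dict.mk [("en", "July"), ("es", "Julio")], PySem.Dict.mk [("en", "August"), ("es", "Agosto")], PySem.Dict.mk [("en", "September"), ("es", "Septiembre")], PySem.Dict.mk [("en", "October"), ("es", "Octubre")], PySem.Dict.mk [("en", "November"), ("es", "Noviembre")], PySem.Dict.mk [("en", "December"), ("es", "Diciembre")]] "February" "Febrero" rfl hc'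
              (by intro u hu; rw [hs]; fin_cases hu <;> decide)
              (by rw [hs]; decide) (by decide)]
        exact (pv_updA_fire lang tab "february" (PySem.Dict.mk [("en", "February"), ("es", "Febrero")]) hc'
              (by rw [hs]; decide) (by decide) (by decide)).symm
      · rw [pv_fire lang tab [PySem.Dict.mk [("en", "January"), ("es", "Enero")], PySem.Dict.mk [("en", "February"), ("es", "Febrero")]] [PySem.Dict.mk [("en", "April"), ("es", "Abril")], PySem.Dict.mk [("en", "May"), ("es", "Mayo")], PySem.Dict.mk [("en", "June"), ("es", "Junio")], PySem.Dict.mk [("en", "July"), ("es", "Julio")], PySem.Dict.mk [("en", "August"), ("es", "Agosto")], PySem.Dict.mk [("en", "September"), ("es", "Septiembre")], PySem.Dict.mk [("en", "October"), ("es", "Octubre")], PySem.Dict.mk [("en", "November"), ("es", "Noviembre")], PySem.Dict.mk [("en", "December"), ("es", "Diciembre")]] "March" "Marzo" rfl hc'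
              (by intro u hu; rw [hs]; fin_cases hu <;> decide)
              (by rw [hs]; decide) (by decide)]
        exact (pv_updA_fire lang tab "march" (PySem.Dict.mk [("en", "March"), ("es", "Marzo")]) hc'
              (by rw [hs]; decide) (by decide) (by decide)).symm
      · rw [pv_fire lang tab [PySem.Dict.mk [("en", "January"), ("es", "Enero")], PySem.Dict.mk [("en", "February"), ("es", "Febrero")]] [PySem.Dict.mk [("en", "April"), ("es", "Abril")], PySem.Dict.mk [("en", "May"), ("es", "Mayo")], PySem.Dict.mk [("en", "June"), ("es", "Junio")], PySem.Dict.mk [("en", "July"), ("es", "Julio")], PySem.Dict.mk [("en", "August"), ("es", "Agosto")], PySem.Dict.mk [("en", "September"), ("es", "Septiembre")], PySem.Dict.mk [("en", "October"), ("es", "Octubre")], PySem.Dict.mk [("en", "November"), ("es", "Noviembre")], PySem.Dict.mk [("en", "December"), ("es", "Diciembre")]] "March" "Marzo" rfl hc'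
              (by intro u hu; rw [hs]; fin_cases hu <;> decide)
              (by rw [hs]; decide) (by decide)]
        exact (pv_updA_fire lang tab "march" (PySem.Dict.mk [("en", "March"), ("es", "Marzo")]) hc'
              (by rw [hs]; decide) (by decide) (by decide)).symm
      · rw [pv_fire lang tab [PySem.Dict.mk [("en", "January"), ("es", "Enero")], PySem.Dict.mk [("en", "February"), ("es", "Febrero")], PySem.Dict.mk [("en", "March"), ("es", "Marzo")]] [PySem.Dict.mk [("en", "May"), ("es", "Mayo")], PySem.Dict.mk [("en", "June"), ("es", "Junio")], PySem.Dict.mk [("en", "July"), ("es", "Julio")], PySem.Dict.mk [("en", "August"), ("es", "Agosto")], PySem.Dict.mk [("en", "September"), ("es", "Septiembre")], PySem.Dict.mk [("en", "October"), ("es", "Octubre")], PySem.Dict.mk [("en", "November"), ("es", "Noviembre")], PySem.Dict.mk [("en", "December"), ("es", "Diciembre")]] "April" "Abril" rfl hc'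
              (by intro u hu; rw [hs]; fin_cases hu <;> decide)
              (by rw [hs]; decide) (by decide)]
        exact (pv_updA_fire lang tab "april" (PySem.Dict.mk [("en", "April"), ("es", "Abril")]) hc'
              (by rw [hs]; decide) (by decide) (by decide)).symm
      · rw [pv_fire lang tab [PySem.Dict.mk [("en", "January"), ("es", "Enero")], PySem.Dict.mk [("en", "February"), ("es", "Febrero")], PySem.Dict.mk [("en", "March"), ("es", "Marzo")]] [PySem.Dict.mk [("en", "May"), ("es", "Mayo")], PySem.Dict.mk [("en", "June"), ("es", "Junio")], PySem.Dict.mk [("en", "July"), ("es", "Julio")], PySem.Dict.mk [("en", "August"), ("es", "Agosto")], PySem.Dict.mk [("en", "September"), ("es", "Septiembre")], PySem.Dict.mk [("en", "October"), ("es", "Octubre")], PySem.Dict.mk [("en", "November"), ("es", "Noviembre")], PySem.Dict.mk [("en", "December"), ("es", "Diciembre")]] "April" "Abril" rfl hc'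
              (by intro u hu; rw [hs]; fin_cases hu <;> decide)
              (by rw [hs]; decide) (by decide)]
        exact (pv_updA_fire lang tab "april" (PySem.Dict.mk [("en", "April"), ("es", "Abril")]) hc'
              (by rw [hs]; decide) (by decide) (by decide)).symm
      · rw [pv_fire lang tab [PySem.Dict.mk [("en", "January"), ("es", "Enero")], PySem.Dict.mk [("en", "February"), ("es", "Febrero")], PySem.Dict.mk [("en", "March"), ("es", "Marzo")], PySem.Dict.mk [("en", "April"), ("es", "Abril")]] [PySem.Dict.mk [("en", "June"), ("es", "Junio")], PySem.Dict.mk [("en", "July"), ("es", "Julio")], PySem.Dict.mk [("en", "August"), ("es", "Agosto")], PySem.Dict.mk [("en", "September"), ("es", "Septiembre")], PySem.Dict.mk [("en", "October"), ("es", "Octubre")], PySem.Dict.mk [("en", "November"), ("es", "Noviembre")], PySem.Dict.mk [("en", "December"), ("es", "Diciembre")]] "May" "Mayo" rfl hc'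
              (by intro u hu; rw [hs]; fin_cases hu <;> decide)
              (by rw [hs]; decide) (by decide)]
        exact (pv_updA_fire lang tab "may" (PySem.Dict.mk [("en", "May"), ("es", "Mayo")]) hc'
              (by rw [hs]; decide) (by decide) (by decide)).symm
      · rw [pv_fire lang tab [PySem.Dict.mk [("en", "January"), ("es", "Enero")], PySem.Dict.mk [("en", "February"), ("es", "Febrero")], PySem.Dict.mk [("en", "March"), ("es", "Marzo")], PySem.Dict.mk [("en", "April"), ("es", "Abril")]] [PySem.Dict.mk [("en", "June"), ("es", "Junio")], PySem.Dict.mk [("en", "July"), ("es", "Julio")], PySem.Dict.mk [("en", "August"), ("es", "Agosto")], PySem.Dict.mk [("en", "September"), ("es", "Septiembre")], PySem.Dict.mk [("en", "October"), ("es", "Octubre")], PySem.Dict.mk [("en", "November"), ("es", "Noviembre")], PySem.Dict.mk [("en", "December"), ("es", "Diciembre")]] "May" "Mayo" rfl hc'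
              (by intro u hu; rw [hs]; fin_cases hu <;> decide)
              (by rw [hs]; decide) (by decide)]
        exact (pv_updA_fire lang tab "may" (PySem.Dict.mk [("en", "May"), ("es", "Mayo")]) hc'
              (by rw [hs]; decide) (by decide) (by decide)).symm
      · rw [pv_fire lang tab [PySem.Dict.mk [("en", "January"), ("es", "Enero")], PySem.Dict.mk [("en", "February"), ("es", "Febrero")], PySem.Dict.mk [("en", "March"), ("es", "Marzo")], PySem.Dict.mk [("en", "April"), ("es", "Abril")], PySem.Dict.mk [("en", "May"), ("es", "Mayo")]] [PySem.Dict.mk [("en", "July"), ("es", "Julio")], PySem.Dict.mk [("en", "August"), ("es", "Agosto")], PySem.Dict.mk [("en", "September"), ("es", "Septiembre")], PySem.Dict.mk [("en", "October"), ("es", "Octubre")], PySem.Dict.mk [("en", "November"), ("es", "Noviembre")], PySem.Dict.mk [("en", "December"), ("es", "Diciembre")]] "June" "Junio" rfl hc'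
              (by intro u hu; rw [hs]; fin_cases hu <;> decide)
              (by rw [hs]; decide) (by decide)]
        exact (pv_updA_fire lang tab "june" (PySem.Dict.mk [("en", "June"), ("es", "Junio")]) hc'
              (by rw [hs]; decide) (by decide) (by decide)).symm
      · rw [pv_fire lang tab [PySem.Dict.mk [("en", "January"), ("es", "Enero")], PySem.Dict.mk [("en", "February"), ("es", "Febrero")], PySem.Dict.mk [("en", "March"), ("es", "Marzo")], PySem.Dict.mk [("en", "April"), ("es", "Abril")], PySem.Dict.mk [("en", "May"), ("es", "Mayo")]] [PySem.Dict.mk [("en", "July"), ("es", "Julio")], PySem.Dict.mk [("en", "August"), ("es", "Agosto")], PySem.Dict.mk [("en", "September"), ("es", "Septiembre")], PySem.Dict.mk [("en", "October"), ("es", "Octubre")], PySem.Dict.mk [("en", "November"), ("es", "Noviembre")], PySem.Dict.mk [("en", "December"), ("es", "Diciembre")]] "June" "Junio" rfl hc'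
              (by intro u hu; rw [hs]; fin_cases hu <;> decide)
              (by rw [hs]; decide) (by decide)]
        exact (pv_updA_fire lang tab "june" (PySem.Dict.mk [("en", "June"), ("es", "Junio")]) hc'
              (by rw [hs]; decide) (by decide) (by decide)).symm
      · rw [pv_fire lang tab [PySem.Dict.mk [("en", "January"), ("es", "Enero")], PySem.Dict.mk [("en", "February"), ("es", "Febrero")], PySem.Dict.mk [("en", "March"), ("es", "Marzo")], PySem.Dict.mk [("en", "April"), ("es", "Abril")], PySem.Dict.mk [("en", "May"), ("es", "Mayo")], PySem.Dict.mk [("en", "June"), ("es", "Junio")]] [PySem.Dict.mk [("en", "August"), ("es", "Agosto")], PySem.Dict.mk [("en", "September"), ("es", "Septiembre")], PySem.Dict.mk [("en", "October"), ("es", "Octubre")], PySem.Dict.mk [("en", "November"), ("es", "Noviembre")], PySem.Dict.mk [("en", "December"), ("es", "Diciembre")]] "July" "Julio" rfl hc'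
              (by intro u hu; rw [hs]; fin_cases hu <;> decide)
              (by rw [hs]; decide) (by decide)]
        exact (pv_updA_fire lang tab "july" (PySem.Dict.mk [("en", "July"), ("es", "Julio")]) hc'
              (by rw [hs]; decide) (by decide) (by decide)).symm
      · rw [pv_fire lang tab [PySem.Dict.mk [("en", "January"), ("es", "Enero")], PySem.Dict.mk [("en", "February"), ("es", "Febrero")], PySem.Dict.mk [("en", "March"), ("es", "Marzo")], PySem.Dict.mk [("en", "April"), ("es", "Abril")], PySem.Dict.mk [("en", "May"), ("es", "Mayo")], PySem.Dict.mk [("en", "June"), ("es", "Junio")]] [PySem.Dict.mk [("en", "August"), ("es", "Agosto")], PySem.Dict.mk [("en", "September"), ("es", "Septiembre")], PySem.Dict.mk [("en", "October"), ("es", "Octubre")], PySem.Dict.mk [("en", "November"), ("es", "Noviembre")], PySem.Dict.mk [("en", "December"), ("es", "Diciembre")]] "July" "Julio" rfl hc'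
              (by intro u hu; rw [hs]; fin_cases hu <;> decide)
              (by rw [hs]; decide) (by decide)]
        exact (pv_updA_fire lang tab "july" (PySem.Dict.mk [("en", "July"), ("es", "Julio")]) hc'
              (by rw [hs]; decide) (by decide) (by decide)).symm
      · rw [pv_fire lang tab [PySem.Dict.mk [("en", "January"), ("es", "Enero")], PySem.Dict.mk [("en", "February"), ("es", "Febrero")], PySem.Dict.mk [("en", "March"), ("es", "Marzo")], PySem.Dict.mk [("en", "April"), ("es", "Abril")], PySem.Dict.mk [("en", "May"), ("es", "Mayo")], PySem.Dict.mk [("en", "June"), ("es", "Junio")], PySem.Dict.mk [("en", "July"), ("es", "Julio")]] [PySem.Dict.mk [("en", "September"), ("es", "Septiembre")], PySem.Dict.mk [("en", "October"), ("es", "Octubre")], PySem.Dict.mk [("en", "November"), ("es", "Noviembre")], PySem.Dict.mk [("en", "December"), ("es", "Diciembre")]] "August" "Agosto" rfl hc'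
              (by intro u hu; rw [hs]; fin_cases hu <;> decide)
              (by rw [hs]; decide) (by decide)]
        exact (pv_updA_fire lang tab "august" (PySem.Dict.mk [("en", "August"), ("es", "Agosto")]) hc'
              (by rw [hs]; decide) (by decide) (by decide)).symm
      · rw [pv_fire lang tab [PySem.Dict.mk [("en", "January"), ("es", "Enero")], PySem.Dict.mk [("en", "February"), ("es", "Febrero")], PySem.Dict.mk [("en", "March"), ("es", "Marzo")], PySem.Dict.mk [("en", "April"), ("es", "Abril")], PySem.Dict.mk [("en", "May"), ("es", "Mayo")], PySem.Dict.mk [("en", "June"), ("es", "Junio")], PySem.Dict.mk [("en", "July"), ("es", "Julio")]] [PySem.Dict.mk [("en", "September"), ("es", "Septiembre")], PySem.Dict.mk [("en", "October"), ("es", "Octubre")], PySem.Dict.mk [("en", "November"), ("es", "Noviembre")], PySem.Dict.mk [("en", "December"), ("es", "Diciembre")]] "August" "Agosto" rfl hc'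
              (by intro u hu; rw [hs]; fin_cases hu <;> decide)
              (by rw [hs]; decide) (by decide)]
        exact (pv_updA_fire lang tab "august" (PySem.Dict.mk [("en", "August"), ("es", "Agosto")]) hc'
              (by rw [hs]; decide) (by decide) (by decide)).symm
      · rw [pv_fire lang tab [PySem.Dict.mk [("en", "January"), ("es", "Enero")], PySem.Dict.mk [("en", "February"), ("es", "Febrero")], PySem.Dict.mk [("en", "March"), ("es", "Marzo")], PySem.Dict.mk [("en", "April"), ("es", "Abril")], PySem.Dict.mk [("en", "May"), ("es", "Mayo")], PySem.Dict.mk [("en", "June"), ("es", "Junio")], PySem.Dict.mk [("en", "July"), ("es", "Julio")], PySem.Dict.mk [("en", "August"), ("es", "Agosto")]] [PySem.Dict.mk [("en", "October"), ("es", "Octubre")], PySem.Dict.mk [("en", "November"), ("es", "Noviembre")], PySem.Dict.mk [("en", "December"), ("es", "Diciembre")]] "September" "Septiembre" rfl hc'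
              (by intro u hu; rw [hs]; fin_cases hu <;> decide)
              (by rw [hs]; decide) (by decide)]
        exact (pv_updA_fire lang tab "september" (PySem.Dict.mk [("en", "September"), ("es", "Septiembre")]) hc'
              (by rw [hs]; decide) (by decide) (by decide)).symm
      · rw [pv_fire lang tab [PySem.Dict.mk [("en", "January"), ("es", "Enero")], PySem.Dict.mk [("en", "February"), ("es", "Febrero")], PySem.Dict.mk [("en", "March"), ("es", "Marzo")], PySem.Dict.mk [("en", "April"), ("es", "Abril")], PySem.Dict.mk [("en", "May"), ("es", "Mayo")], PySem.Dict.mk [("en", "June"), ("es", "Junio")], PySem.Dict.mk [("en", "July"), ("es", "Julio")], PySem.Dict.mk [("en", "August"), ("es", "Agosto")]] [PySem.Dict.mk [("en", "October"), ("es", "Octubre")], PySem.Dict.mk [("en", "November"), ("es", "Noviembre")], PySem.Dict.mk [("en", "December"), ("es", "Diciembre")]] "September" "Septiembre" rfl hc'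
              (by intro u hu; rw [hs]; fin_cases hu <;> decide)
              (by rw [hs]; decide) (by decide)]
        exact (pv_updA_fire lang tab "september" (PySem.Dict.mk [("en", "September"), ("es", "Septiembre")]) hc'
              (by rw [hs]; decide) (by decide) (by decide)).symm
      · rw [pv_fire lang tab [PySem.Dict.mk [("en", "January"), ("es", "Enero")], PySem.Dict.mk [("en", "February"), ("es", "Febrero")], PySem.Dict.mk [("en", "March"), ("es", "Marzo")], PySem.Dict.mk [("en", "April"), ("es", "Abril")], PySem.Dict.mk [("en", "May"), ("es", "Mayo")], PySem.Dict.mk [("en", "June"), ("es", "Junio")], PySem.Dict.mk [("en", "July"), ("es", "Julio")], PySem.Dict.mk [("en", "August"), ("es", "Agosto")], PySem.Dict.mk [("en", "September"), ("es", "Septiembre")]] [PySem.Dict.mk [("en", "November"), ("es", "Noviembre")], PySem.Dict.mk [("en", "December"), ("es", "Diciembre")]] "October" "Octubre" rfl hc'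
              (by intro u hu; rw [hs]; fin_cases hu <;> decide)
              (by rw [hs]; decide) (by decide)]
        exact (pv_updA_fire lang tab "october" (PySem.Dict.mk [("en", "October"), ("es", "Octubre")]) hc'
              (by rw [hs]; decide) (by decide) (by decide)).symm
      · rw [pv_fire lang tab [PySem.Dict.mk [("en", "January"), ("es", "Enero")], PySem.Dict.mk [("en", "February"), ("es", "Febrero")], PySem.Dict.mk [("en", "March"), ("es", "Marzo")], PySem.Dict.mk [("en", "April"), ("es", "Abril")], PySem.Dict.mk [("en", "May"), ("es", "Mayo")], PySem.Dict.mk [("en", "June"), ("es", "Junio")], PySem.Dict.mk [("en", "July"), ("es", "Julio")], PySem.Dict.mk [("en", "August"), ("es", "Agosto")], PySem.Dict.mk [("en", "September"), ("es", "Septiembre")]] [PySem.Dict.mk [("en", "November"), ("es", "Noviembre")], PySem.Dict.mk [("en", "December"), ("es", "Diciembre")]] "October" "Octubre" rfl hc'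
              (by intro u hu; rw [hs]; fin_cases hu <;> decide)
              (by rw [hs]; decide) (by decide)]
        exact (pv_updA_fire lang tab "october" (PySem.Dict.mk [("en", "October"), ("es", "Octubre")]) hc'
              (by rw [hs]; decide) (by decide) (by decide)).symm
      · rw [pv_fire lang tab [PySem.Dict.mk [("en", "January"), ("es", "Enero")], PySem.Dict.mk [("en", "February"), ("es", "Febrero")], PySem.Dict.mk [("en", "March"), ("es", "Marzo")], PySem.Dict.mk [("en", "April"), ("es", "Abril")], PySem.Dict.mk [("en", "May"), ("es", "Mayo")], PySem.Dict.mk [("en", "June"), ("es", "Junio")], PySem.Dict.mk [("en", "July"), ("es", "Julio")], PySem.Dict.mk [("en", "August"), ("es", "Agosto")], PySem.Dict.mk [("en", "September"), ("es", "Septiembre")], PySem.Dict.mk [("en", "October"), ("es", "Octubre")]] [PySem.Dict.mk [("en", "December"), ("es", "Diciembre")]] "November" "Noviembre" rfl hc'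
              (by intro u hu; rw [hs]; fin_cases hu <;> decide)
              (by rw [hs]; decide) (by decide)]
        exact (pv_updA_fire lang tab "november" (PySem.Dict.mk [("en", "November"), ("es", "Noviembre")]) hc'
              (by rw [hs]; decide) (by decide) (by decide)).symm
      · rw [pv_fire lang tab [PySem.Dict.mk [("en", "January"), ("es", "Enero")], PySem.Dict.mk [("en", "February"), ("es", "Febrero")], PySem.Dict.mk [("en", "March"), ("es", "Marzo")], PySem.Dict.mk [("en", "April"), ("es", "Abril")], PySem.Dict.mk [("en", "May"), ("es", "Mayo")], PySem.Dict.mk [("en", "June"), ("es", "Junio")], PySem.Dict.mk [("en", "July"), ("es", "Julio")], PySem.Dict.mk [("en", "August"), ("es", "Agosto")], PySem.Dict.mk [("en", "September"), ("es", "Septiembre")], PySem.Dict.mk [("en", "October"), ("es", "Octubre")]] [PySem.Dict.mk [("en", "December"), ("es", "Diciembre")]] "November" "Noviembre" rfl hc'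
              (by intro u hu; rw [hs]; fin_cases hu <;> decide)
              (by rw [hs]; decide) (by decide)]
        exact (pv_updA_fire lang tab "november" (PySem.Dict.mk [("en", "November"), ("es", "Noviembre")]) hc'
              (by rw [hs]; decide) (by decide) (by decide)).symm
      · rw [pv_fire lang tab [PySem.Dict.mk [("en", "January"), ("es", "Enero")], PySem.Dict.mk [("en", "February"), ("es", "Febrero")], PySem.Dict.mk [("en", "March"), ("es", "Marzo")], PySem.Dict.mk [("en", "April"), ("es", "Abril")], PySem.Dict.mk [("en", "May"), ("es", "Mayo")], PySem.Dict.mk [("en", "June"), ("es", "Junio")], PySem.Dict.mk [("en", "July"), ("es", "Julio")], PySem.Dict.mk [("en", "August"), ("es", "Agosto")], PySem.Dict.mk [("en", "September"), ("es", "Septiembre")], PySem.Dict.mk [("en", "October"), ("es", "Octubre")], PySem.Dict.mk [("en", "November"), ("es", "Noviembre")]] [] "December" "Diciembre" rfl hc'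
              (by intro u hu; rw [hs]; fin_cases hu <;> decide)
              (by rw [hs]; decide) (by decide)]
        exact (pv_updA_fire lang tab "december" (PySem.Dict.mk [("en", "December"), ("es", "Diciembre")]) hc'
              (by rw [hs]; decide) (by decide) (by decide)).symm
      · rw [pv_fire lang tab [PySem.Dict.mk [("en", "January"), ("es", "Enero")], PySem.Dict.mk [("en", "February"), ("es", "Febrero")], PySem.Dict.mk [("en", "March"), ("es", "Marzo")], PySem.Dict.mk [("en", "April"), ("es", "Abril")], PySem.Dict.mk [("en", "May"), ("es", "Mayo")], PySem.Dict.mk [("en", "June"), ("es", "Junio")], PySem.Dict.mk [("en", "July"), ("es", "Julio")], PySem.Dict.mk [("en", "August"), ("es", "Agosto")], PySem.Dict.mk [("en", "September"), ("es", "Septiembre")], PySem.Dict.mk [("en", "October"), ("es", "Octubre")], PySem.Dict.mk [("en", "November"), ("es", "Noviembre")]] [] "December" "Diciembre" rfl hc'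
              (by intro u hu; rw [hs]; fin_cases hu <;> decide)
              (by rw [hs]; decide) (by decide)]
        exact (pv_updA_fire lang tab "december" (PySem.Dict.mk [("en", "December"), ("es", "Diciembre")]) hc'
              (by rw [hs]; decide) (by decide) (by decide)).symm
    · have hlook : pvMonthLookup.get? (pvStr tab) = none := by
        rw [PySem.Dict.get?_eq_none_iff_not_mem_keys]
        have hkeys : ∀ x ∈ pvMonthLookup.keys, x ∈ pvLoweredNames := by decide
        exact fun hk => hs (hkeys _ hk)
      rw [pv_skip_orig lang tab _
            (fun u hu hmem => hs ((by decide : ∀ u ∈ pvMonthNames.values, ∀ y ∈ pvNamesOf u, y ∈ pvLoweredNames) u hu _ hmem))]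
      unfold pvUpdA
      unfold pvStr at hlook
      rw [if_neg (by simp [hc'])]
      simp only [hlook]

-- ===== VERDICT (by name: the statement is the Claim_ definition above) =====
theorem translate_tab_names_spec : Claim_equal_translate_tab_names := by
  intro cfg lang _ _
  unfold Spec_translate_tab_names translate_tab_names translate_tab_names_alt
  split
  · rfl
  · rw [pv_foldl_map_comm]
    simp only [pv_perTab]
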